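-- pv_equiv track=rewrite | github.com/LFunTech/lfun-team-pipeline | templates/.pipeline/autosteps/duplicate_analyzer.py | is_test_path
-- ===== SOURCE A (Python) =====
-- def is_test_path(path):
--     """检查路径是否为测试文件"""
--     # 去除行号后缀（如 :25）
--     file_path = path.split(':')[0].lower()
--     # 路径以 test/ 或 tests/ 开头
--     if file_path.startswith(('test/', 'tests/', '__tests__/')):
--         return True
--     # 路径中包含 /test/ /tests/ /__tests__/ 目录
--     if any(seg in file_path for seg in ['/test/', '/tests/', '/__tests__/']):
--         return True
--     # 文件名包含 .test. .spec. _test.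
--     basename = file_path.rsplit('/', 1)[-1] if '/' in file_path else file_path
--     if any(seg in basename for seg in ['.test.', '.spec.', '_test.']):
--         return True
--     return False
-- ===== SOURCE B (Python) =====
-- def is_test_path(path):
--     """检查路径是否为测试文件"""
--     segments = path.split(':')[0].lower().split('/')
--     if any(seg in ('test', 'tests', '__tests__') for seg in segments[:-1]):
--         return True
--     basename = segments[-1]
--     return any(m in basename for m in ('.test.', '.spec.', '_test.'))
-- ===== Notes on version B (the rewrite author's own statement) =====
-- stated objective: simpler
-- what changed: B splits the lowered path into slash-separated segments once and tests the non-last segments for equality with test, tests and __tests__ and only the last segment for the basename markers, replacing A's three sequential startswith/substring scans and its rsplit basename extraction.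
import Mathlib
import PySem

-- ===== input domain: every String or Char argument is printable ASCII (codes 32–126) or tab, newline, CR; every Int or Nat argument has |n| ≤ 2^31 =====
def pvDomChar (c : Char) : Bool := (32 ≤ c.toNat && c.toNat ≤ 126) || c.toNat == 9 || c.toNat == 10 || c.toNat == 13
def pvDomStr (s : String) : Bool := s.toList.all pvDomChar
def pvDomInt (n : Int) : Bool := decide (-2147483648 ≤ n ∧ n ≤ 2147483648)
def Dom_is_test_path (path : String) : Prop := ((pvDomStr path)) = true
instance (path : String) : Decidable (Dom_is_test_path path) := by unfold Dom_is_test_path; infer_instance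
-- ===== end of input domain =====

-- B re-implements the three sequential substring/prefix checks by splitting the path into
-- '/'-segments once and testing segment equality / the last segment (objective: simpler).

-- ===== PORT A =====
-- hand port of `file_path.rsplit('/', 1)[-1]` (only used when '/' is in file_path):
-- the suffix of the string after the last '/' — exact.
def pvAfterLastSlash (fp : List Char) : List Char :=
  (fp.reverse.takeWhile (fun c => !(c == '/'))).reverse

def is_test_path (path : String) : Bool :=
  let file_path := PySem.Chars.lower ((PySem.Chars.splitOn path.toList [':']).headD [])
  if PySem.Chars.startswith file_path "test/".toList ||
      PySem.Chars.startswith file_path "tests/".toList ||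
      PySem.Chars.startswith file_path "__tests__/".toList then true
  else if ["/test/".toList, "/tests/".toList, "/__tests__/".toList].any
      (fun seg => PySem.Chars.isIn seg file_path) then true
  else
    let basename := if PySem.Chars.isIn ['/'] file_path then pvAfterLastSlash file_path
      else file_path
    [".test.".toList, ".spec.".toList, "_test.".toList].any
      (fun seg => PySem.Chars.isIn seg basename)

-- ===== PORT B =====
def is_test_path_alt (path : String) : Bool :=
  let segments :=
    PySem.Chars.splitOn (PySem.Chars.lower ((PySem.Chars.splitOn path.toList [':']).headD [])) ['/']
  if segments.dropLast.any (fun seg =>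
      seg == "test".toList || seg == "tests".toList || seg == "__tests__".toList) then true
  else
    let basename := segments.getLastD []
    [".test.".toList, ".spec.".toList, "_test.".toList].any
      (fun m => PySem.Chars.isIn m basename)

-- ===== PRECONDITION & SPEC =====
def Spec_is_test_path (path : String) (out : Bool) : Prop := out = is_test_path_alt path
instance (path : String) (out : Bool) : Decidable (Spec_is_test_path path out) := by unfold Spec_is_test_path; infer_instance

-- ===== CLAIM (what is proved, stated in full; the proofs are below) =====
def Claim_equal_is_test_path : Prop := ∀ (path : String), Dom_is_test_path path → Spec_is_test_path path (is_test_path path)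

-- ===== LEMMAS AND PROOFS =====

-- pvSc c l = Python's l.split(c) for a single separator character, structurally recursive.
def pvSc (c : Char) : List Char → List (List Char)
  | [] => [[]]
  | a :: rest =>
    if a = c then [] :: pvSc c rest
    else
      match pvSc c rest with
      | [] => [[a]]
      | h :: t => (a :: h) :: t

-- pvJoin c is the inverse: intercalate the separator.
def pvJoin (c : Char) : List (List Char) → List Char
  | [] => []
  | [x] => x
  | x :: y :: t => x ++ c :: pvJoin c (y :: t)

theorem pvSc_ne_nil (c : Char) (l : List Char) : pvSc c l ≠ [] := by
  cases l with
  | nil => simp [pvSc]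
  | cons a rest => simp only [pvSc]; split <;> simp_all; split <;> simp

theorem pvSc_cons_exists (c : Char) (l : List Char) : ∃ h t, pvSc c l = h :: t := by
  cases e : pvSc c l with
  | nil => exact absurd e (pvSc_ne_nil c l)
  | cons x y => exact ⟨x, y, rfl⟩

theorem pvGo_spec (c : Char) (fuel : Nat) : ∀ (l cur : List Char) (acc : List (List Char)),
    l.length < fuel →
    PySem.Chars.splitOn.go [c] fuel l cur acc =
      acc.reverse ++ (cur.reverse ++ (pvSc c l).headD []) :: (pvSc c l).tail := by
  induction fuel with
  | zero => intro l cur acc h; omega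
  | succ fuel ih =>
    intro l cur acc h
    cases l with
    | nil => simp [PySem.Chars.splitOn.go, pvSc]
    | cons a rest =>
      simp only [PySem.Chars.splitOn.go]
      by_cases hac : a = c
      · subst hac
        have hpre : List.isPrefixOf [a] (a :: rest) = true := by simp [List.isPrefixOf]
        rw [if_pos hpre]
        simp only [List.length_singleton, List.drop_succ_cons, List.drop_zero]
        simp only [List.length_cons] at h
        rw [ih rest [] (cur.reverse :: acc) (by omega)]
        obtain ⟨h', t', e⟩ := pvSc_cons_exists a rest
        simp [pvSc, e]
      · have hpre : List.isPrefixOf [c] (a :: rest) = false := by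
          simp [List.isPrefixOf]; exact fun hh => absurd hh.symm hac
        rw [if_neg (by simp [hpre])]
        simp only [List.length_cons] at h
        rw [ih rest (a :: cur) acc (by omega)]
        obtain ⟨h', t', e⟩ := pvSc_cons_exists c rest
        simp [pvSc, hac, e]

theorem pvSplitOn_single (l : List Char) (c : Char) :
    PySem.Chars.splitOn l [c] = pvSc c l := by
  unfold PySem.Chars.splitOn
  rw [pvGo_spec c (l.length + 1) l [] [] (by omega)]
  obtain ⟨h', t', e⟩ := pvSc_cons_exists c l
  simp [e]

theorem pvSc_of_not_mem (c : Char) (l : List Char) (h : c ∉ l) : pvSc c l = [l] := by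
  induction l with
  | nil => rfl
  | cons a rest ih =>
    simp only [List.mem_cons, not_or] at h
    simp [pvSc, Ne.symm h.1, ih h.2]

theorem pvSc_tail_ne_nil (c : Char) (l : List Char) (h : c ∈ l) : (pvSc c l).tail ≠ [] := by
  induction l with
  | nil => simp at h
  | cons a rest ih =>
    by_cases hac : a = c
    · simpa [pvSc, hac] using pvSc_ne_nil c rest
    · have hm : c ∈ rest := by
        rcases List.mem_cons.mp h with h' | h'
        · exact absurd h'.symm hac
        · exact h'
      obtain ⟨hh, t, e⟩ := pvSc_cons_exists c rest
      have ht := ih hm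
      rw [e] at ht
      simp only [List.tail_cons] at ht
      simp [pvSc, hac, e, ht]

theorem pvSc_append (c : Char) (u v : List Char) :
    pvSc c (u ++ c :: v) = pvSc c u ++ pvSc c v := by
  induction u with
  | nil => simp [pvSc]
  | cons a u' ih =>
    by_cases hac : a = c
    · simp [pvSc, hac, ih]
    · obtain ⟨h1, t1, e1⟩ := pvSc_cons_exists c u'
      simp [pvSc, hac, ih, e1]

theorem pvJoin_pvSc (c : Char) (l : List Char) : pvJoin c (pvSc c l) = l := by
  induction l with
  | nil => rfl
  | cons a rest ih =>
    by_cases hac : a = c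
    · subst hac
      rw [show pvSc a (a :: rest) = [] :: pvSc a rest by simp [pvSc]]
      obtain ⟨h1, t1, e1⟩ := pvSc_cons_exists a rest
      rw [e1, show pvJoin a ([] :: h1 :: t1) = [] ++ a :: pvJoin a (h1 :: t1) from rfl, ← e1, ih]
      rfl
    · obtain ⟨h1, t1, e1⟩ := pvSc_cons_exists c rest
      simp only [pvSc, if_neg hac, e1]
      cases t1 with
      | nil => simp only [pvJoin]; rw [show (a :: h1) = a :: pvJoin c [h1] from rfl, ← e1, ih]
      | cons y t' =>
        simp only [pvJoin, List.cons_append]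
        rw [show h1 ++ c :: pvJoin c (y :: t') = pvJoin c (h1 :: y :: t') from rfl, ← e1, ih]

theorem pvJoin_cons (c : Char) (w : List Char) (m : List (List Char)) (h : m ≠ []) :
    pvJoin c (w :: m) = w ++ c :: pvJoin c m := by
  cases m with
  | nil => simp at h
  | cons y t => rfl

theorem pvJoin_append (c : Char) (l1 m : List (List Char)) (h1 : l1 ≠ []) (h2 : m ≠ []) :
    pvJoin c (l1 ++ m) = pvJoin c l1 ++ c :: pvJoin c m := by
  induction l1 with
  | nil => simp at h1
  | cons x t ih =>
    cases t with
    | nil => cases m with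
      | nil => simp at h2
      | cons y t' => simp [pvJoin]
    | cons z t' =>
      have := ih (by simp)
      rw [List.cons_append, pvJoin_cons c x (z :: t' ++ m) (by simp),
        pvJoin_cons c x (z :: t') (by simp), this, List.append_assoc, List.cons_append]

theorem pvMem_dropLast_of_append {α : Type} (l1 l2 : List α) (a : α) (h : l2 ≠ []) :
    a ∈ (l1 ++ a :: l2).dropLast := by
  rw [List.dropLast_append_of_ne_nil (by simp), List.dropLast_cons_of_ne_nil h]
  simp

theorem pvExists_of_mem_dropLast {α : Type} {a : α} {l : List α} (h : a ∈ l.dropLast) :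
    ∃ l1 l2, l = l1 ++ a :: l2 ∧ l2 ≠ [] := by
  have hne : l ≠ [] := by rintro rfl; simp at h
  obtain ⟨s, t, e⟩ := List.mem_iff_append.mp h
  refine ⟨s, t ++ [l.getLast hne], ?_, by simp⟩
  conv_lhs => rw [← List.dropLast_concat_getLast hne]
  rw [e]
  simp

theorem pvDir_iff (w fp : List Char) (hw : '/' ∉ w) :
    ((w ++ ['/']) <+: fp ∨ ('/' :: (w ++ ['/'])) <:+: fp) ↔ w ∈ (pvSc '/' fp).dropLast := by
  constructor
  · rintro (⟨s, rfl⟩ | ⟨u, t, rfl⟩)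
    · rw [List.append_assoc, List.singleton_append, pvSc_append, pvSc_of_not_mem '/' w hw]
      exact pvMem_dropLast_of_append [] _ w (pvSc_ne_nil '/' s)
    · rw [show u ++ ('/' :: (w ++ ['/'])) ++ t = u ++ '/' :: (w ++ '/' :: t) by simp]
      rw [pvSc_append, pvSc_append, pvSc_of_not_mem '/' w hw, List.singleton_append]
      exact pvMem_dropLast_of_append _ _ w (pvSc_ne_nil '/' t)
  · intro h
    obtain ⟨l1, l2, e, hl2⟩ := pvExists_of_mem_dropLast h
    have hfp : fp = pvJoin '/' (l1 ++ w :: l2) := by rw [← e, pvJoin_pvSc]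
    cases l1 with
    | nil =>
      left
      rw [hfp, List.nil_append, pvJoin_cons '/' w l2 hl2]
      exact ⟨pvJoin '/' l2, by simp⟩
    | cons x t =>
      right
      rw [hfp, pvJoin_append '/' (x :: t) (w :: l2) (by simp) (by simp),
        pvJoin_cons '/' w l2 hl2]
      exact ⟨pvJoin '/' (x :: t), pvJoin '/' l2, by simp⟩

theorem pvAfterLast_eq (fp : List Char) :
    pvAfterLastSlash fp = (pvSc '/' fp).getLastD [] := by
  induction fp with
  | nil => rfl
  | cons a rest ih =>
    unfold pvAfterLastSlash at *
    by_cases hac : a = '/'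
    · subst hac
      rw [show pvSc '/' ('/' :: rest) = [] :: pvSc '/' rest by simp [pvSc],
        List.getLastD_cons, ← ih, List.reverse_cons, List.takeWhile_append]
      split
      · next hlen =>
        have : rest.reverse.takeWhile (fun c => !(c == '/')) = rest.reverse :=
          (List.takeWhile_prefix _).eq_of_length hlen
        simp [this]
      · rfl
    · obtain ⟨h1, t1, e1⟩ := pvSc_cons_exists '/' rest
      rw [show pvSc '/' (a :: rest) = (a :: h1) :: t1 by simp [pvSc, hac, e1],
        List.reverse_cons, List.takeWhile_append]
      by_cases hm : '/' ∈ rest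
      · have ht1 : t1 ≠ [] := by
          have := pvSc_tail_ne_nil '/' rest hm
          rw [e1] at this; simpa using this
        have hnf : rest.reverse.takeWhile (fun c => !(c == '/')) ≠ rest.reverse := by
          intro hfull
          have := List.takeWhile_eq_self_iff.mp hfull ('/' : Char) (by simpa using hm)
          simp at this
        rw [if_neg (fun hlen => hnf ((List.takeWhile_prefix _).eq_of_length hlen)), ih, e1]
        cases t1 with
        | nil => exact absurd rfl ht1
        | cons y t' => simp
      · have hfull : rest.reverse.takeWhile (fun c => !(c == '/')) = rest.reverse := by
          rw [List.takeWhile_eq_self_iff]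
          intro x hx
          simp only [Bool.not_eq_eq_eq_not, Bool.not_true, beq_eq_false_iff_ne, ne_eq]
          rintro rfl
          exact hm (by simpa using hx)
        have e1' : pvSc '/' rest = [rest] := pvSc_of_not_mem '/' rest hm
        rw [e1'] at e1
        obtain ⟨rfl, rfl⟩ : h1 = rest ∧ t1 = [] := by
          injection e1 with a b; exact ⟨a.symm, b.symm⟩
        rw [if_pos (by rw [hfull])]
        have hpa : (!(a == '/')) = true := by simp [hac]
        simp [List.takeWhile, hpa]

-- basename as A computes it = last segment as B computes it
theorem pvBase_eq (fp : List Char) :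
    (if PySem.Chars.isIn ['/'] fp then pvAfterLastSlash fp else fp)
      = (pvSc '/' fp).getLastD [] := by
  split
  · exact pvAfterLast_eq fp
  · next hni =>
    have hm : '/' ∉ fp := fun hmem =>
      hni ((PySem.Chars.isIn_iff_infix ['/'] fp).mpr ((List.singleton_infix_iff '/' fp).mpr hmem))
    rw [pvSc_of_not_mem '/' fp hm]
    rfl

-- ===== VERDICT (by name: the statement is the Claim_ definition above) =====
theorem pvMem3_iff {L : List (List Char)} {a b c : List Char} :
    (∃ x ∈ L, (x = a ∨ x = b) ∨ x = c) ↔ a ∈ L ∨ b ∈ L ∨ c ∈ L := by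
  constructor
  · rintro ⟨x, hx, (rfl | rfl) | rfl⟩ <;> tauto
  · rintro (h | h | h)
    exacts [⟨a, h, by tauto⟩, ⟨b, h, by tauto⟩, ⟨c, h, by tauto⟩]

theorem is_test_path_spec : Claim_equal_is_test_path := by
  intro path _
  unfold Spec_is_test_path is_test_path is_test_path_alt
  simp only [pvSplitOn_single, pvBase_eq]
  generalize PySem.Chars.lower ((pvSc ':' path.toList).headD []) = fp
  rw [Bool.eq_iff_iff]
  simp only [Bool.if_true_left, Bool.or_eq_true, List.any_cons, List.any_nil, Bool.or_false,
    PySem.Chars.isIn_iff_infix, PySem.Chars.startswith_iff, List.any_eq_true, beq_iff_eq,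
    decide_eq_true_eq]
  rw [show ("test/".toList : List Char) = "test".toList ++ ['/'] by decide,
    show ("tests/".toList : List Char) = "tests".toList ++ ['/'] by decide,
    show ("__tests__/".toList : List Char) = "__tests__".toList ++ ['/'] by decide,
    show ("/test/".toList : List Char) = '/' :: ("test".toList ++ ['/']) by decide,
    show ("/tests/".toList : List Char) = '/' :: ("tests".toList ++ ['/']) by decide,
    show ("/__tests__/".toList : List Char) = '/' :: ("__tests__".toList ++ ['/']) by decide,
    pvMem3_iff]
  rw [← pvDir_iff "test".toList fp (by decide), ← pvDir_iff "tests".toList fp (by decide),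
    ← pvDir_iff "__tests__".toList fp (by decide)]
  tauto
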